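-- pv_equiv track=rewrite | github.com/JO-HEEJIN/nvidia-devtech-portfolio | projects/06-cuda-image-processing/sample_images/create_simple_test_images.py | generate_circles
-- ===== SOURCE A (Python) =====
-- def generate_circles(width, height):
--     """Generate image with circles."""
--     data = [0] * (width * height)
--
--     # Simple circle drawing
--     center_x, center_y = width // 2, height // 2
--     radius = min(width, height) // 4
--
--     for y in range(height):
--         for x in range(width):
--             distance_sq = (x - center_x)**2 + (y - center_y)**2
--             if distance_sq <= radius**2:
--                 data[y * width + x] = 255
--             elif distance_sq <= (radius + 20)**2:
--                 data[y * width + x] = 128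
--
--     return data
-- ===== SOURCE B (Python) =====
-- def _isqrt(n):
--     """Integer square root of n >= 0, by binary search."""
--     lo, hi = 0, n + 1
--     while lo + 1 < hi:
--         mid = (lo + hi) // 2
--         if mid * mid <= n:
--             lo = mid
--         else:
--             hi = mid
--     return lo
--
--
-- def generate_circles(width, height):
--     """Generate image with circles (row-span fill instead of per-pixel distance test)."""
--     data = [0] * (width * height)
--     center_x, center_y = width // 2, height // 2
--     radius = min(width, height) // 4
--     inner_sq = radius ** 2
--     outer_sq = (radius + 20) ** 2
--     for y in range(height):
--         dy_sq = (y - center_y) ** 2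
--         if outer_sq < dy_sq:
--             continue
--         base = y * width
--         odx = _isqrt(outer_sq - dy_sq)
--         for x in range(max(0, center_x - odx), min(width, center_x + odx + 1)):
--             data[base + x] = 128
--         if dy_sq <= inner_sq:
--             idx = _isqrt(inner_sq - dy_sq)
--             for x in range(max(0, center_x - idx), min(width, center_x + idx + 1)):
--                 data[base + x] = 255
--     return data
-- ===== Notes on version B (the rewrite author's own statement) =====
-- stated objective: faster
-- what changed: Replaces the per-pixel squared-distance test over the whole grid with per-row span filling: for each row an integer square root gives the outer and inner half-widths, the clipped 128-span is filled and then overwritten by the 255-span, so pixels outside the outer circle are never touched.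
import Mathlib
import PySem

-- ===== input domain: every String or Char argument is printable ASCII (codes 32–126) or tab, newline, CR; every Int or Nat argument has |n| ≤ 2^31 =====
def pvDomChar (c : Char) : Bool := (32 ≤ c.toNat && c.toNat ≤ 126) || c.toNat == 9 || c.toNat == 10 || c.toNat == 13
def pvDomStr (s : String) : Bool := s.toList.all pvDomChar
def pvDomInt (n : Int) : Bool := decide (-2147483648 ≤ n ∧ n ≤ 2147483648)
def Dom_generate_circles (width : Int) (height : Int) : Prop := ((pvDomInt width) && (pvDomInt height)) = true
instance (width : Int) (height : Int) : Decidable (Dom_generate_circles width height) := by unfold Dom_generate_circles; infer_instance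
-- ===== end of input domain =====

-- B replaces A's per-pixel distance test with per-row span filling via an integer
-- square root; proved to return the same list for all inputs.

-- ===== PORT A =====
-- literal transliteration of A: [0]*(w*h), then nested loops testing each pixel's
-- squared distance; data[y*width+x] = v is pySetD (the index is always in range here).
def generate_circles (width : Int) (height : Int) : List Int :=
  let data : List Int := List.replicate (width * height).toNat 0
  let center_x := PySem.Int.floordiv width 2
  let center_y := PySem.Int.floordiv height 2
  let radius := PySem.Int.floordiv (min width height) 4
  (PySem.List.pyRange 0 height 1).foldl (fun data y =>
    (PySem.List.pyRange 0 width 1).foldl (fun data x =>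
      let distance_sq := (x - center_x) ^ 2 + (y - center_y) ^ 2
      if distance_sq ≤ radius ^ 2 then PySem.List.pySetD data (y * width + x) (255 : Int)
      else if distance_sq ≤ (radius + 20) ^ 2 then PySem.List.pySetD data (y * width + x) (128 : Int)
      else data) data) data

-- ===== PORT B =====
-- helper: _isqrt's binary-search loop (lo exclusive-hi bracket, '//' is floordiv).
theorem isqrtSearch_dec (lo hi : Int) (h : lo + 1 < hi) :
    lo < PySem.Int.floordiv (lo + hi) 2 ∧ PySem.Int.floordiv (lo + hi) 2 < hi := by
  have : PySem.Int.floordiv (lo + hi) 2 = (lo + hi) / 2 := by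
    simp [PySem.Int.floordiv, Int.fdiv_eq_ediv]
  omega

def isqrtSearch (n lo hi : Int) : Int :=
  if _h : lo + 1 < hi then
    if PySem.Int.floordiv (lo + hi) 2 * PySem.Int.floordiv (lo + hi) 2 ≤ n then
      isqrtSearch n (PySem.Int.floordiv (lo + hi) 2) hi
    else isqrtSearch n lo (PySem.Int.floordiv (lo + hi) 2)
  else lo
termination_by (hi - lo).toNat
decreasing_by
  · have := isqrtSearch_dec lo hi _h; omega
  · have := isqrtSearch_dec lo hi _h; omega

def pyIsqrt (n : Int) : Int := isqrtSearch n 0 (n + 1)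

def generate_circles_alt (width : Int) (height : Int) : List Int :=
  let data : List Int := List.replicate (width * height).toNat 0
  let center_x := PySem.Int.floordiv width 2
  let center_y := PySem.Int.floordiv height 2
  let radius := PySem.Int.floordiv (min width height) 4
  let inner_sq := radius ^ 2
  let outer_sq := (radius + 20) ^ 2
  (PySem.List.pyRange 0 height 1).foldl (fun data y =>
    let dy_sq := (y - center_y) ^ 2
    if outer_sq < dy_sq then data
    else
      let base := y * width
      let odx := pyIsqrt (outer_sq - dy_sq)
      let data :=
        (PySem.List.pyRange (max 0 (center_x - odx)) (min width (center_x + odx + 1)) 1).foldl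
          (fun data x => PySem.List.pySetD data (base + x) (128 : Int)) data
      if dy_sq ≤ inner_sq then
        let idx := pyIsqrt (inner_sq - dy_sq)
        (PySem.List.pyRange (max 0 (center_x - idx)) (min width (center_x + idx + 1)) 1).foldl
          (fun data x => PySem.List.pySetD data (base + x) (255 : Int)) data
      else data) data

-- ===== PRECONDITION & SPEC =====
def Spec_generate_circles (width : Int) (height : Int) (out : List Int) : Prop := out = generate_circles_alt width height
instance (width : Int) (height : Int) (out : List Int) : Decidable (Spec_generate_circles width height out) := by unfold Spec_generate_circles; infer_instance

-- ===== CLAIM (what is proved, stated in full; the proofs are below) =====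
def Claim_equal_generate_circles : Prop := ∀ (width : Int) (height : Int), Dom_generate_circles width height → Spec_generate_circles width height (generate_circles width height)

-- ===== LEMMAS AND PROOFS =====

-- length preservation through a fold of in-range assignments
theorem length_foldl_pres {β : Type} (step : List Int → β → List Int)
    (h : ∀ l b, (step l b).length = l.length) :
    ∀ (xs : List β) (l : List Int), (xs.foldl step l).length = l.length := by
  intro xs
  induction xs with
  | nil => intro l; rfl
  | cons x xs ih => intro l; simp only [List.foldl_cons, ih, h]

-- bracket invariant of the binary search: the result S satisfies S² ≤ n < (S+1)²
theorem isqrtSearch_spec (n : Int) : ∀ lo hi : Int, 0 ≤ lo → lo < hi → lo * lo ≤ n →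
    n < hi * hi → 0 ≤ isqrtSearch n lo hi ∧ isqrtSearch n lo hi * isqrtSearch n lo hi ≤ n ∧
      n < (isqrtSearch n lo hi + 1) * (isqrtSearch n lo hi + 1) := by
  intro lo hi
  induction lo, hi using isqrtSearch.induct (n := n) with
  | case1 lo hi h hm ih =>
    intro h0 hlh hlo hhi
    rw [isqrtSearch, dif_pos h, if_pos hm]
    have hd := isqrtSearch_dec lo hi h
    exact ih (by omega) (by omega) hm hhi
  | case2 lo hi h hm ih =>
    intro h0 hlh hlo hhi
    rw [isqrtSearch, dif_pos h, if_neg hm]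
    have hd := isqrtSearch_dec lo hi h
    exact ih h0 (by omega) hlo (by omega)
  | case3 lo hi h =>
    intro h0 hlh hlo hhi
    rw [isqrtSearch, dif_neg h]
    refine ⟨h0, hlo, ?_⟩
    have hhi1 : hi ≤ lo + 1 := by omega
    nlinarith

theorem pyIsqrt_spec (n : Int) (hn : 0 ≤ n) :
    0 ≤ pyIsqrt n ∧ pyIsqrt n * pyIsqrt n ≤ n ∧ n < (pyIsqrt n + 1) * (pyIsqrt n + 1) :=
  isqrtSearch_spec n 0 (n + 1) le_rfl (by omega) (by omega) (by nlinarith)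

-- |z| ≤ isqrt m characterises z² ≤ m for m ≥ 0
theorem sq_le_iff_isqrt (m z : Int) (hm : 0 ≤ m) :
    z ^ 2 ≤ m ↔ (-(pyIsqrt m) ≤ z ∧ z ≤ pyIsqrt m) := by
  obtain ⟨h0, h1, h2⟩ := pyIsqrt_spec m hm
  constructor
  · intro h
    constructor
    · by_contra hc; push Not at hc; nlinarith
    · by_contra hc; push Not at hc; nlinarith
  · rintro ⟨ha, hb⟩; nlinarith

-- getElem? after filling a span at offset base with value v (over List.range form)
theorem span_get_aux (v base a : Int) (hb : 0 ≤ base) (ha : 0 ≤ a) (n : Nat) (l : List Int) (i : Nat) :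
    (((List.range n).map (fun (k : Nat) => a + (k : Int))).foldl (fun data x => PySem.List.pySetD data (base + x) v) l)[i]? =
      if base + a ≤ (i : Int) ∧ (i : Int) < base + a + n ∧ i < l.length then some v else l[i]? := by
  induction n with
  | zero =>
    rw [List.range_zero, List.map_nil, List.foldl_nil, if_neg (by omega)]
  | succ n ih =>
    rw [List.range_succ, List.map_append, List.foldl_append]
    simp only [List.map_cons, List.map_nil, List.foldl_cons, List.foldl_nil]
    have hlen : (((List.range n).map (fun (k : Nat) => a + (k : Int))).foldl
        (fun data x => PySem.List.pySetD data (base + x) v) l).length = l.length :=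
      length_foldl_pres _ (fun l b => PySem.List.length_pySetD l _ v) _ l
    rw [PySem.List.pySetD_of_nonneg _ v (show (0:Int) ≤ base + (a + (n:Int)) by omega),
      List.getElem?_set, hlen, ih]
    split_ifs <;> first | rfl | omega | rw [List.getElem?_eq_none (by omega)]

-- the same for a python span range(a, b)
theorem span_get (v base a b : Int) (hb : 0 ≤ base) (ha : 0 ≤ a) (l : List Int) (i : Nat) :
    ((PySem.List.pyRange a b 1).foldl (fun data x => PySem.List.pySetD data (base + x) v) l)[i]? =
      if base + a ≤ (i : Int) ∧ (i : Int) < base + b ∧ i < l.length then some v else l[i]? := by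
  rw [PySem.List.pyRange_one, span_get_aux v base a hb ha]
  split_ifs <;> first | rfl | omega

-- getElem? after A's conditional per-pixel row loop
theorem condA_get (cx cy r y base : Int) (hb : 0 ≤ base) (n : Nat) (l : List Int) (i : Nat) :
    (((List.range n).map (fun (k : Nat) => (k : Int))).foldl (fun data x =>
        if (x - cx) ^ 2 + (y - cy) ^ 2 ≤ r ^ 2 then PySem.List.pySetD data (base + x) (255 : Int)
        else if (x - cx) ^ 2 + (y - cy) ^ 2 ≤ (r + 20) ^ 2 then PySem.List.pySetD data (base + x) (128 : Int)
        else data) l)[i]? =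
      if base ≤ (i : Int) ∧ (i : Int) < base + n ∧ i < l.length ∧ ((i : Int) - base - cx) ^ 2 + (y - cy) ^ 2 ≤ r ^ 2 then some 255
      else if base ≤ (i : Int) ∧ (i : Int) < base + n ∧ i < l.length ∧ ((i : Int) - base - cx) ^ 2 + (y - cy) ^ 2 ≤ (r + 20) ^ 2 then some 128
      else l[i]? := by
  induction n with
  | zero =>
    rw [List.range_zero, List.map_nil, List.foldl_nil, if_neg (by omega), if_neg (by omega)]
  | succ n ih =>
    rw [List.range_succ, List.map_append, List.foldl_append]
    simp only [List.map_cons, List.map_nil, List.foldl_cons, List.foldl_nil]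
    have hlen : (((List.range n).map (fun (k : Nat) => (k : Int))).foldl (fun data x =>
        if (x - cx) ^ 2 + (y - cy) ^ 2 ≤ r ^ 2 then PySem.List.pySetD data (base + x) (255 : Int)
        else if (x - cx) ^ 2 + (y - cy) ^ 2 ≤ (r + 20) ^ 2 then PySem.List.pySetD data (base + x) (128 : Int)
        else data) l).length = l.length := by
      refine length_foldl_pres _ ?_ _ l
      intro l x
      split_ifs <;> simp [PySem.List.length_pySetD]
    by_cases hi : (i : Int) = base + n
    · have he : (i : Int) - base - cx = (n : Int) - cx := by omega
      rw [he]
      have hidx : (base + (n : Int)).toNat = i := by omega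
      by_cases hP : ((n : Int) - cx) ^ 2 + (y - cy) ^ 2 ≤ r ^ 2
      · rw [if_pos hP, PySem.List.pySetD_of_nonneg _ _ (show (0:Int) ≤ base + (n:Int) by omega),
          List.getElem?_set, hlen, hidx, if_pos rfl]
        by_cases hil : i < l.length
        · rw [if_pos hil, if_pos ⟨by omega, by omega, hil, hP⟩]
        · rw [if_neg hil, if_neg (by omega), if_neg (by omega), List.getElem?_eq_none (by omega)]
      · by_cases hQ : ((n : Int) - cx) ^ 2 + (y - cy) ^ 2 ≤ (r + 20) ^ 2
        · rw [if_neg hP, if_pos hQ,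
            PySem.List.pySetD_of_nonneg _ _ (show (0:Int) ≤ base + (n:Int) by omega),
            List.getElem?_set, hlen, hidx, if_pos rfl]
          by_cases hil : i < l.length
          · rw [if_pos hil, if_neg (fun h => hP h.2.2.2), if_pos ⟨by omega, by omega, hil, hQ⟩]
          · rw [if_neg hil, if_neg (by omega), if_neg (by omega), List.getElem?_eq_none (by omega)]
        · rw [if_neg hP, if_neg hQ, ih, if_neg (by omega), if_neg (by omega),
            if_neg (fun h => hP h.2.2.2), if_neg (fun h => hQ h.2.2.2)]
    · have step : ∀ d : List Int,
          (if ((n:Int) - cx) ^ 2 + (y - cy) ^ 2 ≤ r ^ 2 then PySem.List.pySetD d (base + (n:Int)) (255 : Int)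
           else if ((n:Int) - cx) ^ 2 + (y - cy) ^ 2 ≤ (r + 20) ^ 2 then PySem.List.pySetD d (base + (n:Int)) (128 : Int)
           else d)[i]? = d[i]? := by
        intro d
        split_ifs
        · rw [PySem.List.pySetD_of_nonneg _ _ (show (0:Int) ≤ base + (n:Int) by omega),
            List.getElem?_set, if_neg (by omega)]
        · rw [PySem.List.pySetD_of_nonneg _ _ (show (0:Int) ≤ base + (n:Int) by omega),
            List.getElem?_set, if_neg (by omega)]
        · rfl
      rw [step, ih]
      split_ifs <;> first | rfl | omega

-- one row of A (per-pixel tests) equals one row of B (span fills)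
theorem row_eq (w cx cy r y : Int) (hy : 0 ≤ y) (hr : 0 < w → 0 ≤ r) (l : List Int) :
    (PySem.List.pyRange 0 w 1).foldl (fun data x =>
        if (x - cx) ^ 2 + (y - cy) ^ 2 ≤ r ^ 2 then PySem.List.pySetD data (y * w + x) (255 : Int)
        else if (x - cx) ^ 2 + (y - cy) ^ 2 ≤ (r + 20) ^ 2 then PySem.List.pySetD data (y * w + x) (128 : Int)
        else data) l
    = (if (r + 20) ^ 2 < (y - cy) ^ 2 then l
       else
        if (y - cy) ^ 2 ≤ r ^ 2 then
          (PySem.List.pyRange (max 0 (cx - pyIsqrt (r ^ 2 - (y - cy) ^ 2)))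
              (min w (cx + pyIsqrt (r ^ 2 - (y - cy) ^ 2) + 1)) 1).foldl
            (fun data x => PySem.List.pySetD data (y * w + x) (255 : Int))
            ((PySem.List.pyRange (max 0 (cx - pyIsqrt ((r + 20) ^ 2 - (y - cy) ^ 2)))
                (min w (cx + pyIsqrt ((r + 20) ^ 2 - (y - cy) ^ 2) + 1)) 1).foldl
              (fun data x => PySem.List.pySetD data (y * w + x) (128 : Int)) l)
        else
          (PySem.List.pyRange (max 0 (cx - pyIsqrt ((r + 20) ^ 2 - (y - cy) ^ 2)))
              (min w (cx + pyIsqrt ((r + 20) ^ 2 - (y - cy) ^ 2) + 1)) 1).foldl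
            (fun data x => PySem.List.pySetD data (y * w + x) (128 : Int)) l) := by
  by_cases hw : w ≤ 0
  · rw [PySem.List.pyRange_one_eq_nil hw, List.foldl_nil]
    split_ifs with h1 h2
    · rfl
    · rw [PySem.List.pyRange_one_eq_nil (show min w (cx + pyIsqrt ((r + 20) ^ 2 - (y - cy) ^ 2) + 1) ≤ max 0 (cx - pyIsqrt ((r + 20) ^ 2 - (y - cy) ^ 2)) by omega), List.foldl_nil,
        PySem.List.pyRange_one_eq_nil (show min w (cx + pyIsqrt (r ^ 2 - (y - cy) ^ 2) + 1) ≤ max 0 (cx - pyIsqrt (r ^ 2 - (y - cy) ^ 2)) by omega), List.foldl_nil]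
    · rw [PySem.List.pyRange_one_eq_nil (show min w (cx + pyIsqrt ((r + 20) ^ 2 - (y - cy) ^ 2) + 1) ≤ max 0 (cx - pyIsqrt ((r + 20) ^ 2 - (y - cy) ^ 2)) by omega), List.foldl_nil]
  · push Not at hw
    have hr0 : 0 ≤ r := hr hw
    have hb : 0 ≤ y * w := mul_nonneg hy hw.le
    apply List.ext_getElem?
    intro i
    rw [PySem.List.pyRange_one]
    simp only [Int.sub_zero, zero_add]
    rw [condA_get cx cy r y (y * w) hb w.toNat l i]
    by_cases hout : (r + 20) ^ 2 < (y - cy) ^ 2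
    · rw [if_pos hout]
      have hnoP : ¬(((i : Int) - y * w - cx) ^ 2 + (y - cy) ^ 2 ≤ r ^ 2) := by
        nlinarith [sq_nonneg ((i : Int) - y * w - cx)]
      have hnoQ : ¬(((i : Int) - y * w - cx) ^ 2 + (y - cy) ^ 2 ≤ (r + 20) ^ 2) := by
        nlinarith [sq_nonneg ((i : Int) - y * w - cx)]
      rw [if_neg (fun h => hnoP h.2.2.2), if_neg (fun h => hnoQ h.2.2.2)]
    · push Not at hout
      have hlen128 : ((PySem.List.pyRange (max 0 (cx - pyIsqrt ((r + 20) ^ 2 - (y - cy) ^ 2)))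
          (min w (cx + pyIsqrt ((r + 20) ^ 2 - (y - cy) ^ 2) + 1)) 1).foldl
          (fun data x => PySem.List.pySetD data (y * w + x) (128 : Int)) l).length = l.length :=
        length_foldl_pres _ (fun l x => PySem.List.length_pySetD l _ _) _ l
      have hQiff := sq_le_iff_isqrt ((r + 20) ^ 2 - (y - cy) ^ 2) ((i : Int) - y * w - cx) (by omega)
      rw [if_neg (by omega : ¬(r + 20) ^ 2 < (y - cy) ^ 2)]
      by_cases hin : (y - cy) ^ 2 ≤ r ^ 2
      · rw [if_pos hin]
        have hPiff := sq_le_iff_isqrt (r ^ 2 - (y - cy) ^ 2) ((i : Int) - y * w - cx) (by omega)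
        rw [span_get 255 (y * w) _ _ hb (le_max_left 0 _) _ i, hlen128,
          span_get 128 (y * w) _ _ hb (le_max_left 0 _) l i]
        have e1 : (y * w ≤ (i : Int) ∧ (i : Int) < y * w + (w.toNat : Int) ∧ i < l.length ∧
              ((i : Int) - y * w - cx) ^ 2 + (y - cy) ^ 2 ≤ r ^ 2) ↔
            (y * w + max 0 (cx - pyIsqrt (r ^ 2 - (y - cy) ^ 2)) ≤ (i : Int) ∧
              (i : Int) < y * w + min w (cx + pyIsqrt (r ^ 2 - (y - cy) ^ 2) + 1) ∧ i < l.length) := by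
          constructor
          · rintro ⟨h1, h2, h3, h4⟩
            have hz := hPiff.mp (by omega)
            exact ⟨by omega, by omega, h3⟩
          · rintro ⟨h1, h2, h3⟩
            refine ⟨by omega, by omega, h3, ?_⟩
            have hz : ((i : Int) - y * w - cx) ^ 2 ≤ r ^ 2 - (y - cy) ^ 2 :=
              hPiff.mpr ⟨by omega, by omega⟩
            omega
        have e2 : (y * w ≤ (i : Int) ∧ (i : Int) < y * w + (w.toNat : Int) ∧ i < l.length ∧
              ((i : Int) - y * w - cx) ^ 2 + (y - cy) ^ 2 ≤ (r + 20) ^ 2) ↔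
            (y * w + max 0 (cx - pyIsqrt ((r + 20) ^ 2 - (y - cy) ^ 2)) ≤ (i : Int) ∧
              (i : Int) < y * w + min w (cx + pyIsqrt ((r + 20) ^ 2 - (y - cy) ^ 2) + 1) ∧ i < l.length) := by
          constructor
          · rintro ⟨h1, h2, h3, h4⟩
            have hz := hQiff.mp (by omega)
            exact ⟨by omega, by omega, h3⟩
          · rintro ⟨h1, h2, h3⟩
            refine ⟨by omega, by omega, h3, ?_⟩
            have hz : ((i : Int) - y * w - cx) ^ 2 ≤ (r + 20) ^ 2 - (y - cy) ^ 2 :=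
              hQiff.mpr ⟨by omega, by omega⟩
            omega
        rw [if_congr e1 rfl (if_congr e2 rfl rfl)]
      · rw [if_neg hin]
        rw [span_get 128 (y * w) _ _ hb (le_max_left 0 _) l i]
        have hnoP : ¬(((i : Int) - y * w - cx) ^ 2 + (y - cy) ^ 2 ≤ r ^ 2) := by
          nlinarith [sq_nonneg ((i : Int) - y * w - cx)]
        have e2 : (y * w ≤ (i : Int) ∧ (i : Int) < y * w + (w.toNat : Int) ∧ i < l.length ∧
              ((i : Int) - y * w - cx) ^ 2 + (y - cy) ^ 2 ≤ (r + 20) ^ 2) ↔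
            (y * w + max 0 (cx - pyIsqrt ((r + 20) ^ 2 - (y - cy) ^ 2)) ≤ (i : Int) ∧
              (i : Int) < y * w + min w (cx + pyIsqrt ((r + 20) ^ 2 - (y - cy) ^ 2) + 1) ∧ i < l.length) := by
          constructor
          · rintro ⟨h1, h2, h3, h4⟩
            have hz := hQiff.mp (by omega)
            exact ⟨by omega, by omega, h3⟩
          · rintro ⟨h1, h2, h3⟩
            refine ⟨by omega, by omega, h3, ?_⟩
            have hz : ((i : Int) - y * w - cx) ^ 2 ≤ (r + 20) ^ 2 - (y - cy) ^ 2 :=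
              hQiff.mpr ⟨by omega, by omega⟩
            omega
        rw [if_neg (fun h => hnoP h.2.2.2), if_congr e2 rfl rfl]

theorem generate_circles_main (width height : Int) :
    generate_circles width height = generate_circles_alt width height := by
  simp only [generate_circles, generate_circles_alt]
  refine PySem.List.foldl_congr_mem _ _ _ _ ?_
  intro acc y hy
  rw [PySem.List.mem_pyRange_one] at hy
  have hr : 0 < width → 0 ≤ PySem.Int.floordiv (min width height) 4 := by
    intro hw
    have : 0 ≤ min width height := by omega
    exact Int.fdiv_nonneg this (by norm_num)
  exact row_eq width (PySem.Int.floordiv width 2) (PySem.Int.floordiv height 2)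
    (PySem.Int.floordiv (min width height) 4) y hy.1 hr acc

-- ===== VERDICT (by name: the statement is the Claim_ definition above) =====
theorem generate_circles_spec : Claim_equal_generate_circles := by
  intro width height _
  exact generate_circles_main width height
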